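-- pv_equiv track=rewrite | github.com/minchjung/Algorithm | DS1_203_Priority_Queue_p24_py/203priority_Que[L2]_Scoville_Programmers.py | solution
-- ===== SOURCE A (Python) =====
-- import heapq
--
-- def solution(scoville, K):
--     heapq.heapify(scoville)
--     cnt=0
--     while len(scoville)>=2 :
--         if scoville[0]>=K : break
--         one = heapq.heappop(scoville)
--         two = heapq.heappop(scoville)
--         heapq.heappush(scoville, one+(two*2))
--         cnt+=1
--     if scoville[0]<K: return -1
--     else: return cnt
-- ===== SOURCE B (Python) =====
-- def _insort(s, x):
--     # insert x into sorted list s, after any existing equal elements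
--     i = 0
--     while i < len(s) and s[i] <= x:
--         i += 1
--     s.insert(i, x)
--
--
-- def solution(scoville, K):
--     s = sorted(scoville)
--     cnt = 0
--     while len(s) >= 2 and s[0] < K:
--         one = s.pop(0)
--         two = s.pop(0)
--         _insort(s, one + two * 2)
--         cnt += 1
--     return -1 if s[0] < K else cnt
-- ===== Notes on version B (the rewrite author's own statement) =====
-- stated objective: alternative
-- what changed: Replaces the binary heap with a fully sorted list: sort once up front, take the two smallest from the front, and reinsert each mix at its sorted position, instead of heapify plus heap pops/pushes; A heapifies its argument in place while B leaves it untouched (return values proved equal).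
import Mathlib
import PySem

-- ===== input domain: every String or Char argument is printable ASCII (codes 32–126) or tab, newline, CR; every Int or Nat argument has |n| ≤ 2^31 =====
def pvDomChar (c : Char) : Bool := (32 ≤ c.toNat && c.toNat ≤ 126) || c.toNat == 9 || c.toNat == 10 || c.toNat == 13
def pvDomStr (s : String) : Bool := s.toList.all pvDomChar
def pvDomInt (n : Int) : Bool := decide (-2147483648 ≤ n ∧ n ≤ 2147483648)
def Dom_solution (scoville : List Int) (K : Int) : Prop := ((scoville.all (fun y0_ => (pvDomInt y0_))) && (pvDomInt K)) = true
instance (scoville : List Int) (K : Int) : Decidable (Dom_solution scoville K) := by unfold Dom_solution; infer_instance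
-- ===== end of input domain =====

-- B keeps a fully sorted list (sort once, pop the two smallest from the front, reinsert each
-- mix at its sorted place) instead of A's binary heap; A heapifies its argument in place while
-- B does not mutate it — the equivalence proved here is about the RETURN value only.

-- ===== PORT A =====
-- A's heapq library calls are ported by their documented value semantics: heap[0] is the
-- smallest element, heappop removes and returns the smallest, heappush adds an element.
-- For Int elements this is value-exact (which of several equal minima is removed cannot
-- affect the list of values, only their internal arrangement).

-- heap[0] of a heap, i.e. the minimum of the stored values (0 is never read: A raises on [])
def heapMin : List Int → Int
  | [] => 0
  | x :: xs => xs.foldl min x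

-- the heap after heappop: one occurrence of the minimum removed
def heapPopped (l : List Int) : List Int := l.erase (heapMin l)

theorem heapMin_mem (l : List Int) (h : l ≠ []) : heapMin l ∈ l := by
  match l with
  | x :: xs =>
    have := PySem.List.foldl_min_mem xs x
    cases this with
    | inl h1 => simp [heapMin, h1]
    | inr h1 => simp [heapMin, h1]

theorem length_heapPopped (l : List Int) (h : l ≠ []) :
    (heapPopped l).length = l.length - 1 := by
  simp [heapPopped, List.length_erase_of_mem (heapMin_mem l h)]

-- A's while loop: while len>=2: if heap[0]>=K: break; pop two, push one+(two*2), cnt+=1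
def solLoopA (K : Int) (l : List Int) (cnt : Int) : List Int × Int :=
  if h : 2 ≤ l.length then
    if K ≤ heapMin l then (l, cnt)
    else
      -- one = heappop(...); two = heappop(...); heappush(..., one+(two*2))
      solLoopA K (heapPopped (heapPopped l) ++ [heapMin l + heapMin (heapPopped l) * 2]) (cnt + 1)
  else (l, cnt)
termination_by l.length
decreasing_by
  have hne : l ≠ [] := by intro hn; simp [hn] at h
  have h1 : (heapPopped l).length = l.length - 1 := length_heapPopped l hne
  have hne1 : heapPopped l ≠ [] := by
    intro hn; rw [hn] at h1; simp at h1; omega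
  have h2 : (heapPopped (heapPopped l)).length = (heapPopped l).length - 1 :=
    length_heapPopped _ hne1
  simp only [List.length_append, List.length_cons, List.length_nil]
  omega

def solution (scoville : List Int) (K : Int) : Int :=
  let r := solLoopA K scoville 0
  if heapMin r.1 < K then -1 else r.2

-- ===== PORT B =====
-- _insort: advance past elements ≤ x, insert x there (Source B's linear insort)
def insortLin (s : List Int) (x : Int) : List Int :=
  match s with
  | [] => [x]
  | a :: t => if a ≤ x then a :: insortLin t x else x :: a :: t

theorem length_insortLin (s : List Int) (x : Int) :
    (insortLin s x).length = s.length + 1 := by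
  induction s with
  | nil => rfl
  | cons a t ih => simp only [insortLin]; split <;> simp [ih]

-- B's while loop: while len(s)>=2 and s[0]<K: pop two from the front, insort the mix
def solLoopB (K : Int) (s : List Int) (cnt : Int) : List Int × Int :=
  match s with
  | [] => ([], cnt)
  | [a] => ([a], cnt)
  | a :: b :: t =>
    if a < K then solLoopB K (insortLin t (a + b * 2)) (cnt + 1) else (a :: b :: t, cnt)
termination_by s.length
decreasing_by simp [length_insortLin]

def solution_alt (scoville : List Int) (K : Int) : Int :=
  let r := solLoopB K (PySem.List.sorted scoville (fun x => x) false) 0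
  if r.1.headD 0 < K then -1 else r.2

-- ===== PRECONDITION & SPEC =====
-- Pre_ excludes only the empty list, on which both A and B raise IndexError (s[0]).
def Pre_solution (scoville : List Int) (K : Int) : Prop := scoville ≠ []
instance (scoville : List Int) (K : Int) : Decidable (Pre_solution scoville K) := by
  unfold Pre_solution; infer_instance

def pvWitness_solution : List Int × Int := ([1, 2, 3, 9, 10, 12], 7)

def Spec_solution (scoville : List Int) (K : Int) (out : Int) : Prop := out = solution_alt scoville K
instance (scoville : List Int) (K : Int) (out : Int) : Decidable (Spec_solution scoville K out) := by
  unfold Spec_solution; infer_instance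

-- ===== CLAIM (what is proved, stated in full; the proofs are below) =====
def Claim_equal_solution : Prop := ∀ (scoville : List Int) (K : Int), Dom_solution scoville K → Pre_solution scoville K → Spec_solution scoville K (solution scoville K)

-- ===== LEMMAS AND PROOFS =====

theorem heapMin_le (l : List Int) (a : Int) (ha : a ∈ l) : heapMin l ≤ a := by
  match l with
  | x :: xs =>
    have := (PySem.List.foldl_min_le xs x)
    rcases List.mem_cons.1 ha with h | h
    · simpa [heapMin, h] using this.1
    · exact this.2 a h

-- the heap minimum of any rearrangement of a sorted a :: t is a
theorem heapMin_eq_head (l : List Int) (a : Int) (t : List Int)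
    (hp : l.Perm (a :: t)) (hs : (a :: t).Pairwise (· ≤ ·)) : heapMin l = a := by
  have hne : l ≠ [] := by
    intro hn; rw [hn] at hp; exact (List.cons_ne_nil a t) hp.nil_eq.symm
  have hmem : heapMin l ∈ a :: t := hp.mem_iff.1 (heapMin_mem l hne)
  have hle : heapMin l ≤ a := heapMin_le l a (hp.mem_iff.2 (List.mem_cons_self))
  have hge : a ≤ heapMin l := by
    rcases List.mem_cons.1 hmem with h | h
    · exact h.ge
    · exact (List.pairwise_cons.1 hs).1 _ h
  omega

theorem insortLin_perm (s : List Int) (x : Int) : (insortLin s x).Perm (x :: s) := by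
  induction s with
  | nil => simp [insortLin]
  | cons a t ih =>
    simp only [insortLin]
    split
    · exact ((ih.cons a).trans (List.Perm.swap x a t))
    · exact List.Perm.refl _

theorem insortLin_sorted (s : List Int) (x : Int) (hs : s.Pairwise (· ≤ ·)) :
    (insortLin s x).Pairwise (· ≤ ·) := by
  induction s with
  | nil => simp [insortLin]
  | cons a t ih =>
    rcases List.pairwise_cons.1 hs with ⟨hat, ht⟩
    simp only [insortLin]
    split
    · rename_i hax
      refine List.pairwise_cons.2 ⟨?_, ih ht⟩
      intro y hy
      rcases List.mem_cons.1 ((insortLin_perm t x).mem_iff.1 hy) with h | h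
      · omega
      · exact hat y h
    · rename_i hax
      refine List.pairwise_cons.2 ⟨?_, hs⟩
      intro y hy
      rcases List.mem_cons.1 hy with h | h
      · omega
      · have := hat y h; omega

-- the bisimulation: A's heap and B's sorted list stay permutations of each other,
-- B's list stays sorted, and the two counters stay equal
theorem loop_rel (K : Int) :
    ∀ (n : Nat) (l s : List Int) (cnt : Int), l.length ≤ n → l.Perm s → s.Pairwise (· ≤ ·) →
      (solLoopA K l cnt).1.Perm (solLoopB K s cnt).1 ∧
      (solLoopB K s cnt).1.Pairwise (· ≤ ·) ∧
      (solLoopA K l cnt).2 = (solLoopB K s cnt).2 := by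
  intro n
  induction n with
  | zero =>
    intro l s cnt hlen hp hs
    have hl : l = [] := List.length_eq_zero_iff.1 (Nat.le_zero.1 hlen)
    have hsl : s = [] := by
      have := hp.length_eq; rw [hl] at this
      exact List.length_eq_zero_iff.1 this.symm
    subst hl; subst hsl
    rw [solLoopA.eq_def]
    simp [solLoopB]
  | succ m ih =>
    intro l s cnt hlen hp hs
    match hsm : s with
    | [] =>
      have hl : l = [] := by
        have := hp.length_eq; simp at this
        exact this
      subst hl
      rw [solLoopA.eq_def]
      simp [solLoopB]
    | [a] =>
      have hl1 : l.length = 1 := by simpa using hp.length_eq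
      rw [solLoopA.eq_def, dif_neg (by omega)]
      simp only [solLoopB]
      exact ⟨hp, hs, by simp⟩
    | a :: b :: t =>
      have hlen2 : 2 ≤ l.length := by
        have := hp.length_eq; simp at this; omega
      have hmin : heapMin l = a := heapMin_eq_head l a (b :: t) hp hs
      rw [solLoopA.eq_def, dif_pos hlen2]
      simp only [solLoopB, hmin]
      by_cases hK : K ≤ a
      · rw [if_pos hK, if_neg (by omega)]
        exact ⟨hp, hs, by simp⟩
      · rw [if_neg hK, if_pos (by omega)]
        -- one pop each side
        have hp1 : (heapPopped l).Perm (b :: t) := by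
          have h1 := hp.erase a
          rw [List.erase_cons_head] at h1
          rw [heapPopped.eq_def, hmin]
          exact h1
        have hs1 : (b :: t).Pairwise (· ≤ ·) := (List.pairwise_cons.1 hs).2
        have hmin1 : heapMin (heapPopped l) = b := heapMin_eq_head _ b t hp1 hs1
        have hp2 : (heapPopped (heapPopped l)).Perm t := by
          have h2 := hp1.erase b
          rw [List.erase_cons_head] at h2
          rw [heapPopped.eq_def, hmin1]
          exact h2
        -- the recursive call
        have hlen' : (heapPopped (heapPopped l) ++ [a + b * 2]).length ≤ m := by
          have hne : l ≠ [] := by intro hn; rw [hn] at hlen2; simp at hlen2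
          have h1 := length_heapPopped l hne
          have hne1 : heapPopped l ≠ [] := by
            intro hn; rw [hn] at h1; simp at h1; omega
          have h2 := length_heapPopped (heapPopped l) hne1
          simp only [List.length_append, List.length_cons, List.length_nil]
          omega
        have hpr : (heapPopped (heapPopped l) ++ [a + b * 2]).Perm (insortLin t (a + b * 2)) := by
          refine (List.perm_append_singleton _ _).trans ?_
          exact ((hp2.cons _).trans (insortLin_perm t (a + b * 2)).symm).symm.symm
        have hsr : (insortLin t (a + b * 2)).Pairwise (· ≤ ·) :=
          insortLin_sorted t _ (List.pairwise_cons.1 hs1).2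
        rw [hmin1]
        exact ih _ _ (cnt + 1) hlen' hpr hsr

-- B's loop never empties a nonempty list (insort always returns a nonempty list)
theorem loopB_ne_nil (K : Int) :
    ∀ (n : Nat) (s : List Int) (cnt : Int), s.length ≤ n → s ≠ [] →
      (solLoopB K s cnt).1 ≠ [] := by
  intro n
  induction n with
  | zero =>
    intro s cnt hlen hne
    exact absurd (List.length_eq_zero_iff.1 (Nat.le_zero.1 hlen)) hne
  | succ m ih =>
    intro s cnt hlen hne
    match s with
    | [a] => simp [solLoopB]
    | a :: b :: t =>
      rw [solLoopB]
      split
      · refine ih _ (cnt + 1) ?_ ?_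
        · simp only [length_insortLin]; simp at hlen; omega
        · intro hn
          have := length_insortLin t (a + b * 2); rw [hn] at this; simp at this
      · simp

-- ===== VERDICT (by name: the statement is the Claim_ definition above) =====
theorem solution_spec : Claim_equal_solution := by
  intro scoville K hdom hpre
  unfold Spec_solution solution solution_alt
  set s0 := PySem.List.sorted scoville (fun x => x) false with hs0
  have hperm : scoville.Perm s0 := (PySem.List.sorted_perm scoville (fun x => x) false).symm
  have hsorted : s0.Pairwise (· ≤ ·) := by
    simpa using PySem.List.sorted_pairwise scoville (fun x => x)
  obtain ⟨hP, hS, hC⟩ := loop_rel K scoville.length scoville s0 0 le_rfl hperm hsorted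
  have hs0ne : s0 ≠ [] := by
    intro hn
    have := hperm.length_eq
    rw [hn] at this; simp at this
    exact hpre this
  have hBne : (solLoopB K s0 0).1 ≠ [] :=
    loopB_ne_nil K s0.length s0 0 le_rfl hs0ne
  match hB : (solLoopB K s0 0).1 with
  | [] => exact absurd hB hBne
  | c :: t' =>
    have hPc : (solLoopA K scoville 0).1.Perm (c :: t') := by rw [← hB]; exact hP
    have hSc : (c :: t').Pairwise (· ≤ ·) := by rw [← hB]; exact hS
    have hminA : heapMin (solLoopA K scoville 0).1 = c := heapMin_eq_head _ c t' hPc hSc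
    simp only [hB, hminA, List.headD_cons, hC]
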